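-- pv_equiv track=rewrite | github.com/pfehlinger/risk_adjustment_model | src/v28.py | get_disease_interactions_v28
-- ===== SOURCE A (Python) =====
-- def get_disease_interactions_v28(categories: list) -> list:
--     cancer = False
--     cancer_list = ['HCC17', 'HCC18', 'HCC19', 'HCC20', 'HCC21', 'HCC22', 'HCC23']
--     diabetes = False
--     diabetes_list = ['HCC35', 'HCC36', 'HCC37', 'HCC38']
--     card_resp_fail = False
--     card_resp_fail_list = ['HCC211', 'HCC212', 'HCC213']
--     hf = False
--     hf_list = ['HCC221', 'HCC222', 'HCC223', 'HCC224', 'HCC225', 'HCC226']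
--     chr_lung = False
--     chr_lung_list = ['HCC276', 'HCC277', 'HCC278', 'HCC279', 'HCC280']
--     kidney_v28 = False
--     kidney_v28_list = ['HCC326', 'HCC327', 'HCC328', 'HCC329']
--     sepsis = False
--     sepsis_list = ['HCC2']
--     g_substance_use_disorder_v28 = False
--     g_substance_use_disorder_v28_list = ['HCC135', 'HCC136', 'HCC137', 'HCC138', 'HCC139']
--     g_pyshiatric_v28 = False
--     g_pyshiatric_v28_list = ['HCC151', 'HCC152', 'HCC153', 'HCC154', 'HCC155']
--     neuro_v28 = False
--     neuro_v28_list = ['HCC180', 'HCC181', 'HCC182', 'HCC190', 'HCC191', 'HCC192', 'HCC195', 'HCC196', 'HCC198', 'HCC199']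
--     ulcer_v28 = False
--     ulcer_v28_list = ['HCC379', 'HCC380', 'HCC381', 'HCC382']
--
--
--     for category in cancer_list:
--         if category in categories:
--             cancer = True
--             break
--     for category in diabetes_list:
--         if category in categories:
--             diabetes = True
--             break
--     for category in card_resp_fail_list:
--         if category in categories:
--             card_resp_fail = True
--             break
--     for category in hf_list:
--         if category in categories:
--             hf = True
--             break
--     for category in chr_lung_list:
--         if category in categories:
--             chr_lung = True
--             break
--     for category in kidney_v28_list:
--         if category in categories:
--             kidney_v28 = True
--             break
--     for category in sepsis_list:
--         if category in categories:
--             sepsis = True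
--             break
--     for category in g_substance_use_disorder_v28_list:
--         if category in categories:
--             g_substance_use_disorder_v28 = True
--             break
--     for category in g_pyshiatric_v28_list:
--         if category in categories:
--             g_pyshiatric_v28 = True
--             break
--     for category in neuro_v28_list:
--         if category in categories:
--             neuro_v28 = True
--             break
--     for category in ulcer_v28_list:
--         if category in categories:
--             ulcer_v28 = True
--             break
--     if 'HCC238' in categories:
--         hcc238 = True
--     else:
--         hcc238 = False
--
--
--     interactions = {
--         'DIABETES_HF_V28': bool(diabetes*hf),
--         'HF_CHR_LUNG_V28': bool(hf*chr_lung),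
--         'HF_KIDNEY_V28': bool(hf*kidney_v28),
--         'CHR_LUNG_CARD_RESP_FAIL_V28': bool(chr_lung*card_resp_fail),
--         'HF_HCC238_V28': bool(hf*hcc238),
--         'gSubUseDisorder_gPsych_V28': bool(g_substance_use_disorder_v28*g_pyshiatric_v28),
--     }
--     interaction_list = [key for key, value in interactions.items() if value]
--
--     return interaction_list
-- ===== SOURCE B (Python) =====
-- def get_disease_interactions_v28(categories: list) -> list:
--     # One pass over the input: each category contributes a disease bit to a mask;
--     # each interaction is a bit pattern that must be fully present in the mask.
--     BIT = {}
--     for bit, codes in enumerate([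
--         ['HCC35', 'HCC36', 'HCC37', 'HCC38'],                      # diabetes
--         ['HCC221', 'HCC222', 'HCC223', 'HCC224', 'HCC225', 'HCC226'],  # hf
--         ['HCC276', 'HCC277', 'HCC278', 'HCC279', 'HCC280'],        # chr_lung
--         ['HCC326', 'HCC327', 'HCC328', 'HCC329'],                  # kidney_v28
--         ['HCC211', 'HCC212', 'HCC213'],                            # card_resp_fail
--         ['HCC135', 'HCC136', 'HCC137', 'HCC138', 'HCC139'],        # g_substance_use_disorder_v28
--         ['HCC151', 'HCC152', 'HCC153', 'HCC154', 'HCC155'],        # g_pyshiatric_v28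
--         ['HCC238'],                                                # hcc238
--     ]):
--         for code in codes:
--             BIT[code] = 1 << bit
--     mask = 0
--     for c in categories:
--         mask |= BIT.get(c, 0)
--     INTERACTIONS = [
--         ('DIABETES_HF_V28', 0b00000011),
--         ('HF_CHR_LUNG_V28', 0b00000110),
--         ('HF_KIDNEY_V28', 0b00001010),
--         ('CHR_LUNG_CARD_RESP_FAIL_V28', 0b00010100),
--         ('HF_HCC238_V28', 0b10000010),
--         ('gSubUseDisorder_gPsych_V28', 0b01100000),
--     ]
--     return [name for name, need in INTERACTIONS if mask & need == need]
-- ===== Notes on version B (the rewrite author's own statement) =====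
-- stated objective: faster
-- what changed: Replaced A's eleven break-on-first-hit loops over the disease code groups (each scanning the categories list per code) by a single pass over the input that ORs a per-code bit (from an inverted code->bit dict) into one integer mask, and the interactions by bit patterns tested with mask & need == need; the dead flags (cancer/sepsis/neuro/ulcer) are dropped.
import Mathlib
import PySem

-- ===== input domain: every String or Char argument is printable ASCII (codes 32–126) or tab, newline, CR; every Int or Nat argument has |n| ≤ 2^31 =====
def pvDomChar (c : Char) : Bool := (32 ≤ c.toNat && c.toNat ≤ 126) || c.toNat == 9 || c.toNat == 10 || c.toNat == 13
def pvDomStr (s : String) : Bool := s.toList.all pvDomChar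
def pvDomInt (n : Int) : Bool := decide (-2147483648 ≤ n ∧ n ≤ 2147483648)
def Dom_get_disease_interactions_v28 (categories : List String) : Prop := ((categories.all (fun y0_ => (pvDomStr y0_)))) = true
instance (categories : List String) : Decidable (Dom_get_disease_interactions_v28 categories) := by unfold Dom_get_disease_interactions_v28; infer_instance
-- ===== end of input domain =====

-- B replaces A's eleven break-on-first-hit scans of `categories` with one pass over the input that
-- ORs a per-code bit (inverted code->bit dict) into an integer mask; interactions are bit patterns
-- tested against the mask. Measurably faster; the dead flags (cancer/sepsis/neuro/ulcer) are dropped.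


-- ===== PORT A =====
-- break-on-first-hit flag loop of A: 'for category in group: if category in categories: flag = True; break'
def gdiHit (group : List String) (categories : List String) : Bool :=
  match group with
  | [] => false
  | c :: rest => if categories.contains c then true else gdiHit rest categories

def get_disease_interactions_v28 (categories : List String) : List String :=
  let cancer_list := ["HCC17", "HCC18", "HCC19", "HCC20", "HCC21", "HCC22", "HCC23"]
  let diabetes_list := ["HCC35", "HCC36", "HCC37", "HCC38"]
  let card_resp_fail_list := ["HCC211", "HCC212", "HCC213"]
  let hf_list := ["HCC221", "HCC222", "HCC223", "HCC224", "HCC225", "HCC226"]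
  let chr_lung_list := ["HCC276", "HCC277", "HCC278", "HCC279", "HCC280"]
  let kidney_v28_list := ["HCC326", "HCC327", "HCC328", "HCC329"]
  let sepsis_list := ["HCC2"]
  let g_substance_use_disorder_v28_list := ["HCC135", "HCC136", "HCC137", "HCC138", "HCC139"]
  let g_pyshiatric_v28_list := ["HCC151", "HCC152", "HCC153", "HCC154", "HCC155"]
  let neuro_v28_list := ["HCC180", "HCC181", "HCC182", "HCC190", "HCC191", "HCC192", "HCC195", "HCC196", "HCC198", "HCC199"]
  let ulcer_v28_list := ["HCC379", "HCC380", "HCC381", "HCC382"]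
  let _cancer := gdiHit cancer_list categories
  let diabetes := gdiHit diabetes_list categories
  let card_resp_fail := gdiHit card_resp_fail_list categories
  let hf := gdiHit hf_list categories
  let chr_lung := gdiHit chr_lung_list categories
  let kidney_v28 := gdiHit kidney_v28_list categories
  let _sepsis := gdiHit sepsis_list categories
  let g_substance_use_disorder_v28 := gdiHit g_substance_use_disorder_v28_list categories
  let g_pyshiatric_v28 := gdiHit g_pyshiatric_v28_list categories
  let _neuro_v28 := gdiHit neuro_v28_list categories
  let _ulcer_v28 := gdiHit ulcer_v28_list categories
  let hcc238 := if categories.contains "HCC238" then true else false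
  let interactions : List (String × Bool) :=
    [("DIABETES_HF_V28", diabetes && hf),
     ("HF_CHR_LUNG_V28", hf && chr_lung),
     ("HF_KIDNEY_V28", hf && kidney_v28),
     ("CHR_LUNG_CARD_RESP_FAIL_V28", chr_lung && card_resp_fail),
     ("HF_HCC238_V28", hf && hcc238),
     ("gSubUseDisorder_gPsych_V28", g_substance_use_disorder_v28 && g_pyshiatric_v28)]
  (interactions.filter (fun kv => kv.2)).map (fun kv => kv.1)

-- ===== PORT B =====
def gdiGroups : List (List String) :=
  [["HCC35", "HCC36", "HCC37", "HCC38"],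
   ["HCC221", "HCC222", "HCC223", "HCC224", "HCC225", "HCC226"],
   ["HCC276", "HCC277", "HCC278", "HCC279", "HCC280"],
   ["HCC326", "HCC327", "HCC328", "HCC329"],
   ["HCC211", "HCC212", "HCC213"],
   ["HCC135", "HCC136", "HCC137", "HCC138", "HCC139"],
   ["HCC151", "HCC152", "HCC153", "HCC154", "HCC155"],
   ["HCC238"]]

-- BIT = {code: 1 << bit} built by the two enumerate loops of Source B; the mask and the bit values stay
-- nonnegative Python ints < 2^8, so Nat's <<< / ||| / &&& are exact for Python's << / | / &.
def gdiBIT : PySem.Dict String Nat :=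
  (PySem.List.enumerate gdiGroups).foldl
    (fun d p => p.2.foldl (fun d code => d.insert code (1 <<< p.1.toNat)) d)
    PySem.Dict.empty

def gdiInteractions : List (String × Nat) :=
  [("DIABETES_HF_V28", 3),
   ("HF_CHR_LUNG_V28", 6),
   ("HF_KIDNEY_V28", 10),
   ("CHR_LUNG_CARD_RESP_FAIL_V28", 20),
   ("HF_HCC238_V28", 130),
   ("gSubUseDisorder_gPsych_V28", 96)]

def get_disease_interactions_v28_alt (categories : List String) : List String :=
  let mask := categories.foldl (fun m c => m ||| gdiBIT.getD c 0) 0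
  (gdiInteractions.filter (fun p => mask &&& p.2 == p.2)).map (fun p => p.1)

-- ===== PRECONDITION & SPEC =====
def Spec_get_disease_interactions_v28 (categories : List String) (out : List String) : Prop := out = get_disease_interactions_v28_alt categories
instance (categories : List String) (out : List String) : Decidable (Spec_get_disease_interactions_v28 categories out) := by unfold Spec_get_disease_interactions_v28; infer_instance

-- ===== CLAIM (what is proved, stated in full; the proofs are below) =====
def Claim_equal_get_disease_interactions_v28 : Prop := ∀ (categories : List String), Dom_get_disease_interactions_v28 categories → Spec_get_disease_interactions_v28 categories (get_disease_interactions_v28 categories)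

-- ===== LEMMAS AND PROOFS =====

-- the 8-bit mask written out by its bits
def gdiPacked (b0 b1 b2 b3 b4 b5 b6 b7 : Bool) : Nat :=
  (cond b0 1 0) ||| (cond b1 2 0) ||| (cond b2 4 0) ||| (cond b3 8 0) |||
  (cond b4 16 0) ||| (cond b5 32 0) ||| (cond b6 64 0) ||| (cond b7 128 0)

lemma gdiBIT_items : gdiBIT = PySem.Dict.mk
    [("HCC35", 1), ("HCC36", 1), ("HCC37", 1), ("HCC38", 1), ("HCC221", 2), ("HCC222", 2), ("HCC223", 2), ("HCC224", 2),
     ("HCC225", 2), ("HCC226", 2), ("HCC276", 4), ("HCC277", 4), ("HCC278", 4), ("HCC279", 4), ("HCC280", 4),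
     ("HCC326", 8), ("HCC327", 8), ("HCC328", 8), ("HCC329", 8), ("HCC211", 16), ("HCC212", 16), ("HCC213", 16),
     ("HCC135", 32), ("HCC136", 32), ("HCC137", 32), ("HCC138", 32), ("HCC139", 32), ("HCC151", 64), ("HCC152", 64),
     ("HCC153", 64), ("HCC154", 64), ("HCC155", 64), ("HCC238", 128)] := by rfl

set_option maxHeartbeats 2000000 in
set_option maxRecDepth 4096 in
lemma gdiFlag_packed (c : String) :
    gdiBIT.getD c 0 = gdiPacked
      ((["HCC35", "HCC36", "HCC37", "HCC38"] : List String).contains c)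
      ((["HCC221", "HCC222", "HCC223", "HCC224", "HCC225", "HCC226"] : List String).contains c)
      ((["HCC276", "HCC277", "HCC278", "HCC279", "HCC280"] : List String).contains c)
      ((["HCC326", "HCC327", "HCC328", "HCC329"] : List String).contains c)
      ((["HCC211", "HCC212", "HCC213"] : List String).contains c)
      ((["HCC135", "HCC136", "HCC137", "HCC138", "HCC139"] : List String).contains c)
      ((["HCC151", "HCC152", "HCC153", "HCC154", "HCC155"] : List String).contains c)
      ((["HCC238"] : List String).contains c) := by
  by_cases h0 : c = "HCC35"
  · subst h0; decide
  by_cases h1 : c = "HCC36"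
  · subst h1; decide
  by_cases h2 : c = "HCC37"
  · subst h2; decide
  by_cases h3 : c = "HCC38"
  · subst h3; decide
  by_cases h4 : c = "HCC221"
  · subst h4; decide
  by_cases h5 : c = "HCC222"
  · subst h5; decide
  by_cases h6 : c = "HCC223"
  · subst h6; decide
  by_cases h7 : c = "HCC224"
  · subst h7; decide
  by_cases h8 : c = "HCC225"
  · subst h8; decide
  by_cases h9 : c = "HCC226"
  · subst h9; decide
  by_cases h10 : c = "HCC276"
  · subst h10; decide
  by_cases h11 : c = "HCC277"
  · subst h11; decide
  by_cases h12 : c = "HCC278"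
  · subst h12; decide
  by_cases h13 : c = "HCC279"
  · subst h13; decide
  by_cases h14 : c = "HCC280"
  · subst h14; decide
  by_cases h15 : c = "HCC326"
  · subst h15; decide
  by_cases h16 : c = "HCC327"
  · subst h16; decide
  by_cases h17 : c = "HCC328"
  · subst h17; decide
  by_cases h18 : c = "HCC329"
  · subst h18; decide
  by_cases h19 : c = "HCC211"
  · subst h19; decide
  by_cases h20 : c = "HCC212"
  · subst h20; decide
  by_cases h21 : c = "HCC213"
  · subst h21; decide
  by_cases h22 : c = "HCC135"
  · subst h22; decide
  by_cases h23 : c = "HCC136"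
  · subst h23; decide
  by_cases h24 : c = "HCC137"
  · subst h24; decide
  by_cases h25 : c = "HCC138"
  · subst h25; decide
  by_cases h26 : c = "HCC139"
  · subst h26; decide
  by_cases h27 : c = "HCC151"
  · subst h27; decide
  by_cases h28 : c = "HCC152"
  · subst h28; decide
  by_cases h29 : c = "HCC153"
  · subst h29; decide
  by_cases h30 : c = "HCC154"
  · subst h30; decide
  by_cases h31 : c = "HCC155"
  · subst h31; decide
  by_cases h32 : c = "HCC238"
  · subst h32; decide
  have hc : gdiBIT.contains c = false := by
    rw [gdiBIT_items, PySem.Dict.contains_eq_decide_mem_keys]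
    simp_all [PySem.Dict.keys_mk, List.mem_cons]
  rw [PySem.Dict.getD_of_not_contains _ _ hc]
  simp_all [List.contains_eq_mem, List.mem_cons]
  rfl

lemma gdiPacked_or (a0 a1 a2 a3 a4 a5 a6 a7 b0 b1 b2 b3 b4 b5 b6 b7 : Bool) :
    gdiPacked a0 a1 a2 a3 a4 a5 a6 a7 ||| gdiPacked b0 b1 b2 b3 b4 b5 b6 b7 =
    gdiPacked (a0 || b0) (a1 || b1) (a2 || b2) (a3 || b3) (a4 || b4) (a5 || b5) (a6 || b6) (a7 || b7) := by
  revert a0 a1 a2 a3 a4 a5 a6 a7 b0 b1 b2 b3 b4 b5 b6 b7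
  decide

lemma gdiMask_foldl (cats : List String) (a0 a1 a2 a3 a4 a5 a6 a7 : Bool) :
    cats.foldl (fun m c => m ||| gdiBIT.getD c 0) (gdiPacked a0 a1 a2 a3 a4 a5 a6 a7) =
    gdiPacked
      (a0 || cats.any (fun c => (["HCC35", "HCC36", "HCC37", "HCC38"] : List String).contains c))
      (a1 || cats.any (fun c => (["HCC221", "HCC222", "HCC223", "HCC224", "HCC225", "HCC226"] : List String).contains c))
      (a2 || cats.any (fun c => (["HCC276", "HCC277", "HCC278", "HCC279", "HCC280"] : List String).contains c))
      (a3 || cats.any (fun c => (["HCC326", "HCC327", "HCC328", "HCC329"] : List String).contains c))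
      (a4 || cats.any (fun c => (["HCC211", "HCC212", "HCC213"] : List String).contains c))
      (a5 || cats.any (fun c => (["HCC135", "HCC136", "HCC137", "HCC138", "HCC139"] : List String).contains c))
      (a6 || cats.any (fun c => (["HCC151", "HCC152", "HCC153", "HCC154", "HCC155"] : List String).contains c))
      (a7 || cats.any (fun c => (["HCC238"] : List String).contains c)) := by
  induction cats generalizing a0 a1 a2 a3 a4 a5 a6 a7 with
  | nil => simp
  | cons c t ih =>
    simp only [List.foldl_cons, gdiFlag_packed c, gdiPacked_or, ih, List.any_cons, Bool.or_assoc]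

lemma gdiCond (b0 b1 b2 b3 b4 b5 b6 b7 : Bool) :
    ((gdiPacked b0 b1 b2 b3 b4 b5 b6 b7 &&& 3 == 3) = (b0 && b1)) ∧
    ((gdiPacked b0 b1 b2 b3 b4 b5 b6 b7 &&& 6 == 6) = (b1 && b2)) ∧
    ((gdiPacked b0 b1 b2 b3 b4 b5 b6 b7 &&& 10 == 10) = (b1 && b3)) ∧
    ((gdiPacked b0 b1 b2 b3 b4 b5 b6 b7 &&& 20 == 20) = (b2 && b4)) ∧
    ((gdiPacked b0 b1 b2 b3 b4 b5 b6 b7 &&& 130 == 130) = (b1 && b7)) ∧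
    ((gdiPacked b0 b1 b2 b3 b4 b5 b6 b7 &&& 96 == 96) = (b5 && b6)) := by
  revert b0 b1 b2 b3 b4 b5 b6 b7
  decide

lemma gdiHit_eq_any (g c : List String) : gdiHit g c = c.any (fun x => g.contains x) := by
  induction g with
  | nil => simp [gdiHit]
  | cons a t ih =>
    rw [gdiHit, ih]
    by_cases h : a ∈ c
    · have hc : c.contains a = true := by simpa [List.contains_eq_mem]
      rw [if_pos hc, Bool.eq_iff_iff]
      simp only [List.any_eq_true, List.contains_eq_mem, decide_eq_true_eq, List.mem_cons,
        true_iff]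
      exact ⟨a, h, Or.inl rfl⟩
    · have hc : ¬ c.contains a = true := by simpa [List.contains_eq_mem]
      rw [if_neg hc, Bool.eq_iff_iff]
      simp only [List.any_eq_true, List.contains_eq_mem, decide_eq_true_eq, List.mem_cons]
      constructor
      · rintro ⟨x, hx, hm⟩
        exact ⟨x, hx, Or.inr hm⟩
      · rintro ⟨x, hx, (rfl | hm)⟩
        · exact absurd hx h
        · exact ⟨x, hx, hm⟩

lemma contains_eq_any_singleton (cats : List String) (s : String) :
    cats.contains s = cats.any (fun c => ([s] : List String).contains c) := by
  rw [Bool.eq_iff_iff]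
  simp only [List.any_eq_true, List.contains_eq_mem, decide_eq_true_eq, List.mem_cons,
    List.not_mem_nil, or_false]
  constructor
  · intro h
    exact ⟨s, h, rfl⟩
  · rintro ⟨x, hx, rfl⟩
    exact hx

lemma gdiMask_zero (cats : List String) :
    cats.foldl (fun m c => m ||| gdiBIT.getD c 0) 0 =
    gdiPacked
      (cats.any (fun c => (["HCC35", "HCC36", "HCC37", "HCC38"] : List String).contains c))
      (cats.any (fun c => (["HCC221", "HCC222", "HCC223", "HCC224", "HCC225", "HCC226"] : List String).contains c))
      (cats.any (fun c => (["HCC276", "HCC277", "HCC278", "HCC279", "HCC280"] : List String).contains c))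
      (cats.any (fun c => (["HCC326", "HCC327", "HCC328", "HCC329"] : List String).contains c))
      (cats.any (fun c => (["HCC211", "HCC212", "HCC213"] : List String).contains c))
      (cats.any (fun c => (["HCC135", "HCC136", "HCC137", "HCC138", "HCC139"] : List String).contains c))
      (cats.any (fun c => (["HCC151", "HCC152", "HCC153", "HCC154", "HCC155"] : List String).contains c))
      (cats.any (fun c => (["HCC238"] : List String).contains c)) := by
  have h := gdiMask_foldl cats false false false false false false false false
  simpa using h

-- ===== VERDICT (by name: the statement is the Claim_ definition above) =====
set_option maxHeartbeats 2000000 in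
theorem get_disease_interactions_v28_spec : Claim_equal_get_disease_interactions_v28 := by
  intro cats _
  unfold Spec_get_disease_interactions_v28
  show _ = get_disease_interactions_v28_alt cats
  unfold get_disease_interactions_v28_alt
  simp only [gdiMask_zero, gdiInteractions, List.filter_cons, List.filter_nil,
    (gdiCond _ _ _ _ _ _ _ _).1, (gdiCond _ _ _ _ _ _ _ _).2.1,
    (gdiCond _ _ _ _ _ _ _ _).2.2.1, (gdiCond _ _ _ _ _ _ _ _).2.2.2.1,
    (gdiCond _ _ _ _ _ _ _ _).2.2.2.2.1, (gdiCond _ _ _ _ _ _ _ _).2.2.2.2.2]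
  unfold get_disease_interactions_v28
  simp only [gdiHit_eq_any, Bool.if_false_right, Bool.decide_eq_true, Bool.and_true, contains_eq_any_singleton cats "HCC238",
    List.filter_cons, List.filter_nil]
  split_ifs <;> rfl
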